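-- pv_equiv track=rewrite | github.com/vibimvab/Problems | Programmers/level4/지형_이동.py | cost_to_end
-- ===== SOURCE A (Python) =====
-- def cost_to_end(land, height):
--     # 문제를 잘못 이해함, 지우기 아까워서 남겨둠
--     dp = {}
--     row_count = len(land)
--     col_count = len(land[0])
--
--     dp[(row_count-1, col_count-1)] = 0  # base case
--     # rightmost column
--     for i in range(row_count-2, -1, -1):
--         diff = abs(land[i+1][col_count - 1] - land[i][col_count - 1])
--         if diff > height:
--             dp[(i, col_count-1)] = dp[(i+1, col_count-1)] + diff
--         else:
--             dp[(i, col_count-1)] = dp[(i+1, col_count-1)]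
--
--     # bottommost row
--     for i in range(col_count-2, -1, -1):
--         diff = abs(land[row_count-1][i+1] - land[row_count-1][i])
--         if diff > height:
--             dp[(row_count-1, i)] = dp[(row_count-1, i+1)] + diff
--         else:
--             dp[(row_count - 1, i)] = dp[(row_count - 1, i + 1)]
--
--     # calculate cost on each tile
--     for i in range(row_count-2, -1, -1):
--         for j in range(col_count-2, -1, -1):
--             down_diff = abs(land[i+1][j] - land[i][j])
--             if down_diff > height:
--                 down_cost = dp[(i+1, j)] + down_diff
--             else:
--                 down_cost = dp[(i+1, j)]
--
--             right_diff = abs(land[i][j+1] - land[i][j])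
--             if right_diff > height:
--                 right_cost = dp[(i, j+1)] + right_diff
--             else:
--                 right_cost = dp[(i, j + 1)]
--
--             dp[(i, j)] = min(down_cost, right_cost)
--
--     return dp[(0, 0)]
-- ===== SOURCE B (Python) =====
-- def cost_to_end(land, height):
--     # Forward rolling-row DP: cur[j] = min cost from (0,0) to (current row, j),
--     # computed row by row with zips; no dict, no index arithmetic over a 2D table.
--     def edge(a, b):
--         d = abs(a - b)
--         return d if d > height else 0
--
--     row0 = land[0]
--     cur = [0]
--     for a, b in zip(row0, row0[1:]):
--         cur.append(cur[-1] + edge(a, b))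
--     prev = row0
--     for row in land[1:]:
--         nxt = [cur[0] + edge(prev[0], row[0])]
--         for up, pu, left, here in zip(cur[1:], prev[1:], row, row[1:]):
--             nxt.append(min(up + edge(pu, here), nxt[-1] + edge(left, here)))
--         cur, prev = nxt, row
--     return cur[-1]
-- ===== Notes on version B (the rewrite author's own statement) =====
-- stated objective: simpler
-- what changed: Replaces the backward cost-to-end DP over a dict keyed by (row,col) tuples with a forward rolling-row DP: a single 1D list of cost-from-start values is rebuilt row by row with zips, so the dict, the tuple-key hashing and the reversed index ranges disappear and only O(cols) state is kept.
import Mathlib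
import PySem

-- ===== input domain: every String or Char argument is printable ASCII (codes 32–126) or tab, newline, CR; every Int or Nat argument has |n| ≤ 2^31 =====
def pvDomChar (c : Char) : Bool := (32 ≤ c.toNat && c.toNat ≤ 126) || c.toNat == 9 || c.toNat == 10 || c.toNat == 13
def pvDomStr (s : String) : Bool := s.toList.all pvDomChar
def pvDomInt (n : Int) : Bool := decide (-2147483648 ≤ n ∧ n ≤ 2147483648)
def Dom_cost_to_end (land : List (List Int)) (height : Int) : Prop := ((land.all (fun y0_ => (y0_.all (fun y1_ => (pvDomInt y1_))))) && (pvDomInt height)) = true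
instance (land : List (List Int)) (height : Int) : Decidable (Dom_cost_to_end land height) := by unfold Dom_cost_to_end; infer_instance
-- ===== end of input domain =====

-- B replaces A's backward cost-to-end DP over a dict keyed by (row, col) pairs with a
-- forward rolling-row DP: one 1D list of cost-from-start values rebuilt row by row; objective: simpler.

-- ===== PORT A =====
-- land[i][j]; the .getD defaults are unreachable under Pre_cost_to_end (Python raises IndexError otherwise)
def pvGetIJ (land : List (List Int)) (i j : Int) : Int :=
  (PySem.List.pyGet? ((PySem.List.pyGet? land i).getD []) j).getD 0

def cost_to_end (land : List (List Int)) (height : Int) : Int :=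
  let row_count : Int := land.length
  let col_count : Int := ((PySem.List.pyGet? land 0).getD []).length  -- len(land[0]); IndexError on [] excluded by Pre_
  -- dp[(row_count-1, col_count-1)] = 0  (base case)
  let dp : PySem.Dict (Int × Int) Int := (PySem.Dict.empty).insert (row_count - 1, col_count - 1) 0
  -- rightmost column; every dp[...] read is (get? ...).getD 0 — the key is always present here (no KeyError)
  let dp := (PySem.List.pyRange (row_count - 2) (-1) (-1)).foldl (fun dp i =>
    let diff := |pvGetIJ land (i + 1) (col_count - 1) - pvGetIJ land i (col_count - 1)|
    if diff > height then
      dp.insert (i, col_count - 1) ((dp.get? (i + 1, col_count - 1)).getD 0 + diff)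
    else
      dp.insert (i, col_count - 1) ((dp.get? (i + 1, col_count - 1)).getD 0)) dp
  -- bottommost row
  let dp := (PySem.List.pyRange (col_count - 2) (-1) (-1)).foldl (fun dp i =>
    let diff := |pvGetIJ land (row_count - 1) (i + 1) - pvGetIJ land (row_count - 1) i|
    if diff > height then
      dp.insert (row_count - 1, i) ((dp.get? (row_count - 1, i + 1)).getD 0 + diff)
    else
      dp.insert (row_count - 1, i) ((dp.get? (row_count - 1, i + 1)).getD 0)) dp
  -- calculate cost on each tile
  let dp := (PySem.List.pyRange (row_count - 2) (-1) (-1)).foldl (fun dp i =>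
    (PySem.List.pyRange (col_count - 2) (-1) (-1)).foldl (fun dp j =>
      let down_diff := |pvGetIJ land (i + 1) j - pvGetIJ land i j|
      let down_cost := if down_diff > height then (dp.get? (i + 1, j)).getD 0 + down_diff
                       else (dp.get? (i + 1, j)).getD 0
      let right_diff := |pvGetIJ land i (j + 1) - pvGetIJ land i j|
      let right_cost := if right_diff > height then (dp.get? (i, j + 1)).getD 0 + right_diff
                        else (dp.get? (i, j + 1)).getD 0
      dp.insert (i, j) (min down_cost right_cost)) dp) dp
  (dp.get? (0, 0)).getD 0

-- ===== PORT B =====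
-- edge(a, b): the thresholded step cost
def pvEdge (height a b : Int) : Int :=
  let d := |a - b|
  if d > height then d else 0

-- the inner `for a, b in zip(...): cur.append(cur[-1] + edge(a, b))` loop, carrying cur[-1]
def pvScanRow (height : Int) : Int → List (Int × Int) → List Int
  | _, [] => []
  | last, (a, b) :: rest =>
      (last + pvEdge height a b) :: pvScanRow height (last + pvEdge height a b) rest

-- the inner `for up, pu, left, here in zip(...): nxt.append(min(...))` loop, carrying nxt[-1]
def pvStepRow (height : Int) : Int → List (Int × (Int × (Int × Int))) → List Int
  | _, [] => []
  | last, (up, pu, left, here) :: rest =>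
      (min (up + pvEdge height pu here) (last + pvEdge height left here)) ::
        pvStepRow height (min (up + pvEdge height pu here) (last + pvEdge height left here)) rest

def cost_to_end_alt (land : List (List Int)) (height : Int) : Int :=
  let row0 := (PySem.List.pyGet? land 0).getD []       -- land[0]; IndexError on [] excluded by Pre_
  let cur : List Int := 0 :: pvScanRow height 0 (row0.zip row0.tail)
  let res := (land.tail).foldl (fun (st : List Int × List Int) row =>
      let cur := st.1
      let prev := st.2
      let seed := (PySem.List.pyGet? cur 0).getD 0 +
        pvEdge height ((PySem.List.pyGet? prev 0).getD 0) ((PySem.List.pyGet? row 0).getD 0)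
      let nxt := seed :: pvStepRow height seed (cur.tail.zip (prev.tail.zip (row.zip row.tail)))
      (nxt, row)) (cur, row0)
  (PySem.List.pyGet? res.1 (-1)).getD 0                -- cur[-1]; cur is nonempty under Pre_

-- ===== PRECONDITION & SPEC =====
-- Exactly the inputs on which the Python A returns: a nonempty grid whose first row is nonempty and
-- whose every row has at least len(land[0]) entries (on anything else A raises IndexError).
def Pre_cost_to_end (land : List (List Int)) (height : Int) : Prop :=
  land ≠ [] ∧ 1 ≤ (land.headD []).length ∧ ∀ row ∈ land, (land.headD []).length ≤ row.length
instance (land : List (List Int)) (height : Int) : Decidable (Pre_cost_to_end land height) := by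
  unfold Pre_cost_to_end; infer_instance

def pvWitness_cost_to_end : List (List Int) × Int := ([[1, 5], [2, 3]], 1)

def Spec_cost_to_end (land : List (List Int)) (height : Int) (out : Int) : Prop := out = cost_to_end_alt land height
instance (land : List (List Int)) (height : Int) (out : Int) : Decidable (Spec_cost_to_end land height out) := by
  unfold Spec_cost_to_end; infer_instance

-- ===== CLAIM (what is proved, stated in full; the proofs are below) =====
def Claim_equal_cost_to_end : Prop := ∀ (land : List (List Int)) (height : Int), Dom_cost_to_end land height → Pre_cost_to_end land height → Spec_cost_to_end land height (cost_to_end land height)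

-- ===== LEMMAS AND PROOFS =====
-- cell access and the path-cost value function used by the specification
def pvA (g : List (List Int)) (i j : Nat) : Int := (g.getD i []).getD j 0

def pvG (h : Int) (g : List (List Int)) : Nat → Nat → Nat → Nat → Int
  | 0, 0, _, _ => 0
  | da+1, 0, i, j => pvEdge h (pvA g i j) (pvA g (i+1) j) + pvG h g da 0 (i+1) j
  | 0, db+1, i, j => pvEdge h (pvA g i j) (pvA g i (j+1)) + pvG h g 0 db i (j+1)
  | da+1, db+1, i, j =>
      min (pvEdge h (pvA g i j) (pvA g (i+1) j) + pvG h g da (db+1) (i+1) j)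
          (pvEdge h (pvA g i j) (pvA g i (j+1)) + pvG h g (da+1) db i (j+1))
  termination_by da db _ _ => (da, db)

theorem pvG_row (h : Int) (g : List (List Int)) :
    ∀ (db i j : Nat), pvG h g 0 (db+1) i j
      = pvG h g 0 db i j + pvEdge h (pvA g i (j+db)) (pvA g i (j+db+1)) := by
  intro db
  induction db with
  | zero => intro i j; simp [pvG]
  | succ b ih =>
    intro i j
    rw [show pvG h g 0 (b+1+1) i j = pvEdge h (pvA g i j) (pvA g i (j+1)) + pvG h g 0 (b+1) i (j+1) from by simp [pvG]]
    rw [ih i (j+1)]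
    rw [show pvG h g 0 (b+1) i j = pvEdge h (pvA g i j) (pvA g i (j+1)) + pvG h g 0 b i (j+1) from by simp [pvG]]
    simp only [← Nat.add_assoc]
    rw [Nat.add_right_comm j 1 b]
    omega

theorem pvG_col (h : Int) (g : List (List Int)) :
    ∀ (da i j : Nat), pvG h g (da+1) 0 i j
      = pvG h g da 0 i j + pvEdge h (pvA g (i+da) j) (pvA g (i+da+1) j) := by
  intro da
  induction da with
  | zero => intro i j; simp [pvG]
  | succ a ih =>
    intro i j
    rw [show pvG h g (a+1+1) 0 i j = pvEdge h (pvA g i j) (pvA g (i+1) j) + pvG h g (a+1) 0 (i+1) j from by simp [pvG]]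
    rw [ih (i+1) j]
    rw [show pvG h g (a+1) 0 i j = pvEdge h (pvA g i j) (pvA g (i+1) j) + pvG h g a 0 (i+1) j from by simp [pvG]]
    simp only [← Nat.add_assoc]
    rw [Nat.add_right_comm i 1 a]
    omega

theorem pvG_diamond (h : Int) (g : List (List Int)) :
    ∀ (da db i j : Nat), pvG h g (da+1) (db+1) i j
      = min (pvG h g da (db+1) i j + pvEdge h (pvA g (i+da) (j+db+1)) (pvA g (i+da+1) (j+db+1)))
            (pvG h g (da+1) db i j + pvEdge h (pvA g (i+da+1) (j+db)) (pvA g (i+da+1) (j+db+1))) := by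
  intro da
  induction da with
  | zero =>
    intro db
    induction db with
    | zero =>
      intro i j
      rw [show pvG h g 1 1 i j
          = min (pvEdge h (pvA g i j) (pvA g (i+1) j) + pvG h g 0 1 (i+1) j)
                (pvEdge h (pvA g i j) (pvA g i (j+1)) + pvG h g 1 0 i (j+1)) from by simp [pvG]]
      rw [show pvG h g 0 1 (i+1) j = pvEdge h (pvA g (i+1) j) (pvA g (i+1) (j+1)) + pvG h g 0 0 (i+1) (j+1) from by simp [pvG]]
      rw [show pvG h g 1 0 i (j+1) = pvEdge h (pvA g i (j+1)) (pvA g (i+1) (j+1)) + pvG h g 0 0 (i+1) (j+1) from by simp [pvG]]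
      rw [show pvG h g 0 1 i j = pvEdge h (pvA g i j) (pvA g i (j+1)) + pvG h g 0 0 i (j+1) from by simp [pvG]]
      rw [show pvG h g 1 0 i j = pvEdge h (pvA g i j) (pvA g (i+1) j) + pvG h g 0 0 (i+1) j from by simp [pvG]]
      simp only [pvG, Nat.zero_add, Nat.add_zero]
      simp only [Nat.add_zero, Nat.zero_add, min_def]
      split_ifs <;> omega
    | succ b ihb =>
      intro i j
      rw [show pvG h g 1 (b+1+1) i j
          = min (pvEdge h (pvA g i j) (pvA g (i+1) j) + pvG h g 0 (b+1+1) (i+1) j)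
                (pvEdge h (pvA g i j) (pvA g i (j+1)) + pvG h g 1 (b+1) i (j+1)) from by simp [pvG]]
      rw [pvG_row h g (b+1) (i+1) j]
      rw [ihb i (j+1)]
      rw [show pvG h g 0 (b+1+1) i j = pvEdge h (pvA g i j) (pvA g i (j+1)) + pvG h g 0 (b+1) i (j+1) from by simp [pvG]]
      rw [show pvG h g 1 (b+1) i j
          = min (pvEdge h (pvA g i j) (pvA g (i+1) j) + pvG h g 0 (b+1) (i+1) j)
                (pvEdge h (pvA g i j) (pvA g i (j+1)) + pvG h g 1 b i (j+1)) from by simp [pvG]]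
      simp only [← Nat.add_assoc]
      rw [Nat.add_right_comm j 1 b]
      simp only [Nat.add_zero, Nat.zero_add, min_def]
      split_ifs <;> omega
  | succ a iha =>
    intro db
    induction db with
    | zero =>
      intro i j
      rw [show pvG h g (a+1+1) 1 i j
          = min (pvEdge h (pvA g i j) (pvA g (i+1) j) + pvG h g (a+1) 1 (i+1) j)
                (pvEdge h (pvA g i j) (pvA g i (j+1)) + pvG h g (a+1+1) 0 i (j+1)) from by simp [pvG]]
      rw [iha 0 (i+1) j]
      rw [pvG_col h g (a+1) i (j+1)]
      rw [show pvG h g (a+1) 1 i j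
          = min (pvEdge h (pvA g i j) (pvA g (i+1) j) + pvG h g a 1 (i+1) j)
                (pvEdge h (pvA g i j) (pvA g i (j+1)) + pvG h g (a+1) 0 i (j+1)) from by simp [pvG]]
      rw [show pvG h g (a+1+1) 0 i j = pvEdge h (pvA g i j) (pvA g (i+1) j) + pvG h g (a+1) 0 (i+1) j from by simp [pvG]]
      simp only [← Nat.add_assoc]
      rw [Nat.add_right_comm i 1 a]
      simp only [Nat.add_zero, Nat.zero_add, min_def]
      split_ifs <;> omega
    | succ b ihb =>
      intro i j
      rw [show pvG h g (a+1+1) (b+1+1) i j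
          = min (pvEdge h (pvA g i j) (pvA g (i+1) j) + pvG h g (a+1) (b+1+1) (i+1) j)
                (pvEdge h (pvA g i j) (pvA g i (j+1)) + pvG h g (a+1+1) (b+1) i (j+1)) from by simp [pvG]]
      rw [iha (b+1) (i+1) j]
      rw [ihb i (j+1)]
      rw [show pvG h g (a+1) (b+1+1) i j
          = min (pvEdge h (pvA g i j) (pvA g (i+1) j) + pvG h g a (b+1+1) (i+1) j)
                (pvEdge h (pvA g i j) (pvA g i (j+1)) + pvG h g (a+1) (b+1) i (j+1)) from by simp [pvG]]
      rw [show pvG h g (a+1+1) (b+1) i j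
          = min (pvEdge h (pvA g i j) (pvA g (i+1) j) + pvG h g (a+1) (b+1) (i+1) j)
                (pvEdge h (pvA g i j) (pvA g i (j+1)) + pvG h g (a+1+1) b i (j+1)) from by simp [pvG]]
      simp only [← Nat.add_assoc]
      rw [Nat.add_right_comm i 1 a, Nat.add_right_comm j 1 b]
      simp only [Nat.add_zero, Nat.zero_add, min_def]
      split_ifs <;> omega

theorem pvScanRow_map (h : Int) :
    ∀ (n : Nat) (p q : Nat → Int) (v : Nat → Int),
      (∀ t, t < n → v (t+1) = v t + pvEdge h (p t) (q t)) →
      pvScanRow h (v 0) ((List.range n).map (fun t => (p t, q t)))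
        = (List.range n).map (fun t => v (t+1)) := by
  intro n
  induction n with
  | zero => intro p q v _; simp [pvScanRow]
  | succ m ih =>
    intro p q v hv
    rw [List.range_succ_eq_map]
    simp only [List.map_cons, List.map_map, Function.comp_def, Nat.succ_eq_add_one]
    rw [pvScanRow]
    rw [← hv 0 (by omega)]
    have := ih (fun t => p (t+1)) (fun t => q (t+1)) (fun t => v (t+1))
      (fun t ht => hv (t+1) (by omega))
    simp only at this
    rw [this]

theorem pvStepRow_map (h : Int) :
    ∀ (n : Nat) (u p l r : Nat → Int) (v : Nat → Int),
      (∀ t, t < n → v (t+1) = min (u t + pvEdge h (p t) (r t)) (v t + pvEdge h (l t) (r t))) →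
      pvStepRow h (v 0) ((List.range n).map (fun t => (u t, p t, l t, r t)))
        = (List.range n).map (fun t => v (t+1)) := by
  intro n
  induction n with
  | zero => intro u p l r v _; simp [pvStepRow]
  | succ m ih =>
    intro u p l r v hv
    rw [List.range_succ_eq_map]
    simp only [List.map_cons, List.map_map, Function.comp_def, Nat.succ_eq_add_one]
    rw [pvStepRow]
    rw [← hv 0 (by omega)]
    have := ih (fun t => u (t+1)) (fun t => p (t+1)) (fun t => l (t+1)) (fun t => r (t+1))
      (fun t => v (t+1)) (fun t ht => hv (t+1) (by omega))
    simp only at this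
    rw [this]

def pvStepState (height : Int) (st : List Int × List Int) (row : List Int) : List Int × List Int :=
  let cur := st.1
  let prev := st.2
  let seed := (PySem.List.pyGet? cur 0).getD 0 +
    pvEdge height ((PySem.List.pyGet? prev 0).getD 0) ((PySem.List.pyGet? row 0).getD 0)
  let nxt := seed :: pvStepRow height seed (cur.tail.zip (prev.tail.zip (row.zip row.tail)))
  (nxt, row)

-- rows of a grid satisfying the precondition

theorem pv_row_len (g : List (List Int)) (C : Nat) (hall : ∀ row ∈ g, C ≤ row.length)
    (k : Nat) (hk : k < g.length) : C ≤ (g.getD k []).length := by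
  apply hall
  rw [List.getD_eq_getElem?_getD, List.getElem?_eq_getElem hk]
  exact List.getElem_mem hk

theorem pv_getD_eq (r : List Int) (s : Nat) (hs : s < r.length) : r.getD s 0 = r[s] := by
  rw [List.getD_eq_getElem?_getD, List.getElem?_eq_getElem hs]
  rfl

theorem pv_zip4_eq (g : List (List Int)) (C : Nat) (hC : 1 ≤ C)
    (hall : ∀ row ∈ g, C ≤ row.length) (k : Nat) (hk1 : k + 1 < g.length)
    (v : Nat → Int) :
    (((List.range C).map v).tail).zip
        (((g.getD k []).tail).zip ((g.getD (k+1) []).zip ((g.getD (k+1) []).tail)))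
      = (List.range (C-1)).map (fun t => (v (t+1), pvA g k (t+1), pvA g (k+1) t, pvA g (k+1) (t+1))) := by
  have hpl : C ≤ (g.getD k []).length := pv_row_len g C hall k (by omega)
  have hrl : C ≤ (g.getD (k+1) []).length := pv_row_len g C hall (k+1) hk1
  apply List.ext_getElem
  · simp only [List.length_zip, List.length_tail, List.length_map, List.length_range]
    omega
  · intro t ht1 ht2
    simp only [List.length_map, List.length_range] at ht2
    simp only [List.getElem_zip, List.getElem_tail, List.getElem_map, List.getElem_range]
    simp only [pvA]
    rw [pv_getD_eq (g.getD k []) (t+1) (by omega), pv_getD_eq (g.getD (k+1) []) t (by omega),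
        pv_getD_eq (g.getD (k+1) []) (t+1) (by omega)]

theorem pv_fold_rows (g : List (List Int)) (h : Int) (C : Nat) (hC : 1 ≤ C)
    (hall : ∀ row ∈ g, C ≤ row.length) :
    ∀ (suf : List (List Int)) (k : Nat), k < g.length → g.drop (k+1) = suf →
      suf.foldl (pvStepState h) ((List.range C).map (fun j => pvG h g k j 0 0), g.getD k [])
        = ((List.range C).map (fun j => pvG h g (g.length - 1) j 0 0), g.getD (g.length - 1) []) := by
  intro suf
  induction suf with
  | nil =>
    intro k hk hdrop
    have hlen : g.length ≤ k + 1 := List.drop_eq_nil_iff.mp hdrop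
    have : k = g.length - 1 := by omega
    subst this
    simp
  | cons row suf' ih =>
    intro k hk hdrop
    have hk1 : k + 1 < g.length := by
      by_contra hcon
      rw [List.drop_eq_nil_of_le (by omega)] at hdrop
      simp at hdrop
    have hdc : g.drop (k+1) = g[k+1] :: g.drop (k+2) := List.drop_eq_getElem_cons hk1
    rw [hdc] at hdrop
    have hrow : row = g.getD (k+1) [] := by
      have := (List.cons.injEq _ _ _ _).mp hdrop.symm
      rw [this.1, List.getD_eq_getElem?_getD, List.getElem?_eq_getElem hk1]
      rfl
    have hsuf : g.drop (k+2) = suf' := ((List.cons.injEq _ _ _ _).mp hdrop).2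
    rw [List.foldl_cons]
    have hstep : pvStepState h ((List.range C).map (fun j => pvG h g k j 0 0), g.getD k []) row
        = ((List.range C).map (fun j => pvG h g (k+1) j 0 0), g.getD (k+1) []) := by
      subst hrow
      unfold pvStepState
      simp only
      have hcur0 : (PySem.List.pyGet? ((List.range C).map (fun j => pvG h g k j 0 0)) 0).getD 0
          = pvG h g k 0 0 0 := by
        obtain ⟨m, rfl⟩ : ∃ m, C = m + 1 := ⟨C - 1, by omega⟩
        rw [List.range_succ_eq_map]
        simp
      have hprev0 : (PySem.List.pyGet? (g.getD k []) 0).getD 0 = pvA g k 0 := by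
        have := pv_row_len g C hall k (by omega)
        rw [PySem.List.pyGet?_zero]
        cases hg : g.getD k [] with
        | nil => rw [hg] at this; simp at this; omega
        | cons x xs =>
          rw [List.getD_eq_getElem?_getD] at hg
          simp [pvA, List.getD_eq_getElem?_getD, hg]
      have hrow0 : (PySem.List.pyGet? (g.getD (k+1) []) 0).getD 0 = pvA g (k+1) 0 := by
        have := pv_row_len g C hall (k+1) hk1
        rw [PySem.List.pyGet?_zero]
        cases hg : g.getD (k+1) [] with
        | nil => rw [hg] at this; simp at this; omega
        | cons x xs =>
          rw [List.getD_eq_getElem?_getD] at hg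
          simp [pvA, List.getD_eq_getElem?_getD, hg]
      rw [hcur0, hprev0, hrow0]
      have hseed : pvG h g k 0 0 0 + pvEdge h (pvA g k 0) (pvA g (k+1) 0)
          = pvG h g (k+1) 0 0 0 := by
        rw [pvG_col h g k 0 0]
        simp
      rw [hseed]
      rw [pv_zip4_eq g C hC hall k hk1 (fun j => pvG h g k j 0 0)]
      have hstep' := pvStepRow_map h (C-1)
        (fun t => pvG h g k (t+1) 0 0) (fun t => pvA g k (t+1))
        (fun t => pvA g (k+1) t) (fun t => pvA g (k+1) (t+1))
        (fun t => pvG h g (k+1) t 0 0)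
        (by
          intro t ht
          have := pvG_diamond h g k t 0 0
          simpa using this)
      simp only at hstep'
      rw [hstep']
      refine Prod.ext ?_ rfl
      simp only
      obtain ⟨m, rfl⟩ : ∃ m, C = m + 1 := ⟨C - 1, by omega⟩
      rw [List.range_succ_eq_map (n := m)]
      simp [List.map_map, Function.comp_def]
    rw [hstep]
    exact ih (k+1) hk1 hsuf

theorem pv_zip2_eq (g : List (List Int)) (r0 : List Int) (hg : g = r0 :: g.tail) :
    r0.zip r0.tail
      = (List.range (r0.length - 1)).map (fun t => (pvA g 0 t, pvA g 0 (t+1))) := by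
  apply List.ext_getElem
  · simp only [List.length_zip, List.length_tail, List.length_map, List.length_range]
    omega
  · intro t ht1 ht2
    simp only [List.length_map, List.length_range] at ht2
    simp only [List.getElem_zip, List.getElem_tail, List.getElem_map, List.getElem_range]
    have hA : ∀ (s : Nat) (hs : s < r0.length), pvA g 0 s = r0[s] := by
      intro s hs
      have h1 : pvA g 0 s = r0.getD s 0 := by rw [pvA, hg]; rfl
      rw [h1, pv_getD_eq r0 s hs]
    rw [hA t (by omega), hA (t+1) (by omega)]

theorem cost_to_end_alt_eq (g : List (List Int)) (h : Int) (hne : g ≠ [])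
    (hC : 1 ≤ (g.headD []).length)
    (hall : ∀ row ∈ g, (g.headD []).length ≤ row.length) :
    cost_to_end_alt g h = pvG h g (g.length - 1) ((g.headD []).length - 1) 0 0 := by
  cases hg0 : g with
  | nil => exact absurd hg0 hne
  | cons r0 rest =>
    subst hg0
    simp only [List.headD_cons] at hC hall ⊢
    have hlam : (fun (st : List Int × List Int) (row : List Int) =>
        let cur := st.1
        let prev := st.2
        let seed := (PySem.List.pyGet? cur 0).getD 0 +
          pvEdge h ((PySem.List.pyGet? prev 0).getD 0) ((PySem.List.pyGet? row 0).getD 0)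
        let nxt := seed :: pvStepRow h seed (cur.tail.zip (prev.tail.zip (row.zip row.tail)))
        (nxt, row)) = pvStepState h := by
      funext st row
      simp only [pvStepState]
    have hstart : cost_to_end_alt (r0 :: rest) h
        = (PySem.List.pyGet? ((rest.foldl (pvStepState h)
            (0 :: pvScanRow h 0 (r0.zip r0.tail), r0)).1) (-1)).getD 0 := by
      unfold cost_to_end_alt
      rw [hlam]
      simp only [PySem.List.pyGet?_zero_cons, Option.getD_some, List.tail_cons]
    rw [hstart]
    have hcur0 : (0 : Int) :: pvScanRow h 0 (r0.zip r0.tail)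
        = (List.range r0.length).map (fun j => pvG h (r0 :: rest) 0 j 0 0) := by
      rw [pv_zip2_eq (r0 :: rest) r0 rfl]
      have := pvScanRow_map h (r0.length - 1)
        (fun t => pvA (r0 :: rest) 0 t) (fun t => pvA (r0 :: rest) 0 (t+1))
        (fun j => pvG h (r0 :: rest) 0 j 0 0)
        (by
          intro t ht
          have := pvG_row h (r0 :: rest) t 0 0
          simpa using this)
      simp only [show pvG h (r0 :: rest) 0 0 0 0 = 0 from by simp [pvG]] at this
      rw [this]
      obtain ⟨m, hm⟩ : ∃ m, r0.length = m + 1 := ⟨r0.length - 1, by omega⟩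
      rw [hm]
      rw [List.range_succ_eq_map (n := m)]
      simp [List.map_map, Function.comp_def]
      simp [pvG]
    rw [hcur0]
    have hfold := pv_fold_rows (r0 :: rest) h r0.length hC
      (by simpa using hall) rest 0 (by simp) (by simp)
    have hr0' : (r0 :: rest).getD 0 [] = r0 := rfl
    rw [hr0'] at hfold
    conv_lhs => rw [hfold]
    simp only
    obtain ⟨m, hm⟩ : ∃ m, r0.length = m + 1 := ⟨r0.length - 1, by omega⟩
    rw [hm, List.range_succ, List.map_append, PySem.List.pyGet?_neg_one]
    simp

def pvVal (h : Int) (g : List (List Int)) (i j : Nat) : Int :=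
  pvG h g (g.length - 1 - i) ((g.headD []).length - 1 - j) i j

-- proof-side names for A's three loop bodies (definitionally the lambdas in cost_to_end)

def pvLoopCol (land : List (List Int)) (height cc : Int)
    (dp : PySem.Dict (Int × Int) Int) (i : Int) : PySem.Dict (Int × Int) Int :=
  let diff := |pvGetIJ land (i + 1) (cc - 1) - pvGetIJ land i (cc - 1)|
  if diff > height then
    dp.insert (i, cc - 1) ((dp.get? (i + 1, cc - 1)).getD 0 + diff)
  else
    dp.insert (i, cc - 1) ((dp.get? (i + 1, cc - 1)).getD 0)

def pvLoopRow (land : List (List Int)) (height rc : Int)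
    (dp : PySem.Dict (Int × Int) Int) (i : Int) : PySem.Dict (Int × Int) Int :=
  let diff := |pvGetIJ land (rc - 1) (i + 1) - pvGetIJ land (rc - 1) i|
  if diff > height then
    dp.insert (rc - 1, i) ((dp.get? (rc - 1, i + 1)).getD 0 + diff)
  else
    dp.insert (rc - 1, i) ((dp.get? (rc - 1, i + 1)).getD 0)

def pvLoopCell (land : List (List Int)) (height : Int) (i : Int)
    (dp : PySem.Dict (Int × Int) Int) (j : Int) : PySem.Dict (Int × Int) Int :=
  let down_diff := |pvGetIJ land (i + 1) j - pvGetIJ land i j|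
  let down_cost := if down_diff > height then (dp.get? (i + 1, j)).getD 0 + down_diff
                   else (dp.get? (i + 1, j)).getD 0
  let right_diff := |pvGetIJ land i (j + 1) - pvGetIJ land i j|
  let right_cost := if right_diff > height then (dp.get? (i, j + 1)).getD 0 + right_diff
                    else (dp.get? (i, j + 1)).getD 0
  dp.insert (i, j) (min down_cost right_cost)

theorem pvGetIJ_eq (g : List (List Int)) (i j : Nat) :
    pvGetIJ g (i : Int) (j : Int) = pvA g i j := by
  simp [pvGetIJ, pvA, List.getD_eq_getElem?_getD]

-- A's `if diff > h: dp[k] = p + diff else: dp[k] = p` collapses to one insert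

theorem pv_if_insert (c : Prop) [Decidable c] (d : PySem.Dict (Int × Int) Int)
    (k : Int × Int) (p x : Int) :
    (if c then d.insert k (p + x) else d.insert k p) = d.insert k (p + if c then x else 0) := by
  split_ifs <;> simp

theorem pv_abs_edge (h B A : Int) : (if |A - B| > h then |A - B| else 0) = pvEdge h B A := by
  rw [abs_sub_comm A B]
  unfold pvEdge
  simp only

-- peeling one step of pvVal along the last column / last row

theorem pvVal_col (h : Int) (g : List (List Int)) (m : Nat) (hm : m + 1 < g.length) :
    pvVal h g m ((g.headD []).length - 1)
      = pvEdge h (pvA g m ((g.headD []).length - 1)) (pvA g (m+1) ((g.headD []).length - 1))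
        + pvVal h g (m+1) ((g.headD []).length - 1) := by
  unfold pvVal
  obtain ⟨k, hk⟩ : ∃ k, g.length - 1 - m = k + 1 := ⟨g.length - 1 - (m+1), by omega⟩
  rw [hk, show g.length - 1 - (m+1) = k from by omega]
  simp [pvG]

theorem pv_loop1 (g : List (List Int)) (h : Int) (C : Nat) (hC : 1 ≤ C)
    (hCdef : C = (g.headD []).length) :
    ∀ (n : Nat) (d : PySem.Dict (Int × Int) Int), n < g.length →
      (∀ i : Nat, n ≤ i → i < g.length → d.get? ((i : Int), ((C - 1 : Nat) : Int)) = some (pvVal h g i (C-1))) →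
      (∀ i : Nat, i < g.length →
        ((PySem.List.pyRange ((n : Int) - 1) (-1) (-1)).foldl (pvLoopCol g h (C : Int)) d).get?
          ((i : Int), ((C - 1 : Nat) : Int)) = some (pvVal h g i (C-1))) := by
  intro n
  induction n with
  | zero =>
    intro d _ hd i hi
    rw [show ((0 : Nat) : Int) - 1 = -1 by norm_num, PySem.List.pyRange_neg_one_eq_nil (by norm_num)]
    exact hd i (by omega) hi
  | succ m ih =>
    intro d hn hd i hi
    rw [show ((m + 1 : Nat) : Int) - 1 = (m : Int) by push_cast; ring]
    rw [PySem.List.pyRange_neg_one_cons (by omega : (-1 : Int) < (m : Int))]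
    rw [List.foldl_cons]
    apply ih (pvLoopCol g h (C : Int) d (m : Int)) (by omega) _ i hi
    intro i' hi1 hi2
    unfold pvLoopCol
    simp only
    rw [show (C : Int) - 1 = ((C - 1 : Nat) : Int) from by omega]
    have hget : d.get? ((m : Int) + 1, ((C - 1 : Nat) : Int)) = some (pvVal h g (m+1) (C-1)) := by
      have := hd (m+1) (by omega) (by omega)
      rw [show ((m + 1 : Nat) : Int) = (m : Int) + 1 from by push_cast; ring] at this
      exact this
    have hij1 : pvGetIJ g ((m : Int) + 1) (((C - 1 : Nat)) : Int) = pvA g (m+1) (C-1) := by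
      rw [show ((m : Int) + 1) = ((m + 1 : Nat) : Int) from by push_cast; ring]
      exact pvGetIJ_eq g (m+1) (C-1)
    have hij0 : pvGetIJ g (m : Int) (((C - 1 : Nat)) : Int) = pvA g m (C-1) := pvGetIJ_eq g m (C-1)
    rw [hij1, hij0, hget]
    simp only [Option.getD_some]
    rw [pv_if_insert, pv_abs_edge]
    rw [PySem.Dict.get?_insert]
    by_cases hmi : i' = m
    · subst hmi
      rw [if_pos rfl]
      rw [hCdef, pvVal_col h g i' (by omega ), add_comm]
    · rw [if_neg (by
        intro hcon
        apply hmi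
        have := congrArg Prod.fst hcon
        simp only at this
        exact_mod_cast this)]
      exact hd i' (by omega) hi2

theorem pv_if_edge (h p B A : Int) :
    (if |A - B| > h then p + |A - B| else p) = p + pvEdge h B A := by
  rw [show (if |A - B| > h then p + |A - B| else p)
      = p + if |A - B| > h then |A - B| else 0 from by split_ifs <;> simp]
  rw [pv_abs_edge]

theorem pvVal_row (h : Int) (g : List (List Int)) (m : Nat) (hR : 1 ≤ g.length)
    (hm : m + 1 < (g.headD []).length) :
    pvVal h g (g.length - 1) m
      = pvEdge h (pvA g (g.length - 1) m) (pvA g (g.length - 1) (m+1))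
        + pvVal h g (g.length - 1) (m+1) := by
  unfold pvVal
  rw [show g.length - 1 - (g.length - 1) = 0 from by omega]
  obtain ⟨k, hk⟩ : ∃ k, (g.headD []).length - 1 - m = k + 1 := ⟨(g.headD []).length - 1 - (m+1), by omega⟩
  rw [hk, show (g.headD []).length - 1 - (m+1) = k from by omega]
  simp [pvG]

theorem pvVal_mid (h : Int) (g : List (List Int)) (i j : Nat)
    (hi : i + 1 < g.length) (hj : j + 1 < (g.headD []).length) :
    pvVal h g i j
      = min (pvEdge h (pvA g i j) (pvA g (i+1) j) + pvVal h g (i+1) j)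
            (pvEdge h (pvA g i j) (pvA g i (j+1)) + pvVal h g i (j+1)) := by
  unfold pvVal
  obtain ⟨ka, hka⟩ : ∃ k, g.length - 1 - i = k + 1 := ⟨g.length - 1 - (i+1), by omega⟩
  obtain ⟨kb, hkb⟩ : ∃ k, (g.headD []).length - 1 - j = k + 1 := ⟨(g.headD []).length - 1 - (j+1), by omega⟩
  rw [hka, hkb, show g.length - 1 - (i+1) = ka from by omega,
      show (g.headD []).length - 1 - (j+1) = kb from by omega]
  simp [pvG]

theorem pv_loop2 (g : List (List Int)) (h : Int) (C : Nat) (hC : 1 ≤ C)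
    (hCdef : C = (g.headD []).length) (hR : 1 ≤ g.length) :
    ∀ (n : Nat) (d : PySem.Dict (Int × Int) Int), n < C →
      (∀ i : Nat, i < g.length → d.get? ((i : Int), ((C - 1 : Nat) : Int)) = some (pvVal h g i (C-1))) →
      (∀ j : Nat, n ≤ j → j < C → d.get? (((g.length - 1 : Nat) : Int), (j : Int)) = some (pvVal h g (g.length - 1) j)) →
      (∀ i : Nat, i < g.length →
        ((PySem.List.pyRange ((n : Int) - 1) (-1) (-1)).foldl (pvLoopRow g h (g.length : Int)) d).get?
          ((i : Int), ((C - 1 : Nat) : Int)) = some (pvVal h g i (C-1))) ∧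
      (∀ j : Nat, j < C →
        ((PySem.List.pyRange ((n : Int) - 1) (-1) (-1)).foldl (pvLoopRow g h (g.length : Int)) d).get?
          (((g.length - 1 : Nat) : Int), (j : Int)) = some (pvVal h g (g.length - 1) j)) := by
  intro n
  induction n with
  | zero =>
    intro d _ hd1 hd2
    rw [show ((0 : Nat) : Int) - 1 = -1 from by norm_num, PySem.List.pyRange_neg_one_eq_nil (by norm_num)]
    exact ⟨fun i hi => hd1 i hi, fun j hj => hd2 j (by omega) hj⟩
  | succ m ih =>
    intro d hn hd1 hd2
    rw [show ((m + 1 : Nat) : Int) - 1 = (m : Int) from by push_cast; ring]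
    rw [PySem.List.pyRange_neg_one_cons (by omega : (-1 : Int) < (m : Int))]
    rw [List.foldl_cons]
    have hbody : pvLoopRow g h (g.length : Int) d (m : Int)
        = d.insert (((g.length - 1 : Nat) : Int), (m : Int))
            (pvVal h g (g.length - 1) (m+1) + pvEdge h (pvA g (g.length - 1) m) (pvA g (g.length - 1) (m+1))) := by
      unfold pvLoopRow
      simp only
      rw [show (g.length : Int) - 1 = ((g.length - 1 : Nat) : Int) from by omega]
      have hget : d.get? (((g.length - 1 : Nat) : Int), (m : Int) + 1) = some (pvVal h g (g.length - 1) (m+1)) := by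
        have := hd2 (m+1) (by omega) (by omega)
        rw [show ((m + 1 : Nat) : Int) = (m : Int) + 1 from by push_cast; ring] at this
        exact this
      have hij1 : pvGetIJ g (((g.length - 1 : Nat)) : Int) ((m : Int) + 1) = pvA g (g.length - 1) (m+1) := by
        rw [show ((m : Int) + 1) = ((m + 1 : Nat) : Int) from by push_cast; ring]
        exact pvGetIJ_eq g (g.length - 1) (m+1)
      have hij0 : pvGetIJ g (((g.length - 1 : Nat)) : Int) (m : Int) = pvA g (g.length - 1) m :=
        pvGetIJ_eq g (g.length - 1) m
      rw [hij1, hij0, hget]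
      simp only [Option.getD_some]
      rw [pv_if_insert, pv_abs_edge]
    rw [hbody]
    have hres := ih (d.insert (((g.length - 1 : Nat) : Int), (m : Int))
            (pvVal h g (g.length - 1) (m+1) + pvEdge h (pvA g (g.length - 1) m) (pvA g (g.length - 1) (m+1))))
      (by omega) ?_ ?_
    · exact hres
    · intro i hi
      rw [PySem.Dict.get?_insert, if_neg (by
        intro hcon
        have := congrArg Prod.snd hcon
        simp only at this
        have : C - 1 = m := by exact_mod_cast this
        omega)]
      exact hd1 i hi
    · intro j hj1 hj2
      rw [PySem.Dict.get?_insert]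
      by_cases hjm : j = m
      · subst hjm
        rw [if_pos rfl]
        rw [pvVal_row h g j hR (by omega), add_comm]
      · rw [if_neg (by
          intro hcon
          have := congrArg Prod.snd hcon
          simp only at this
          exact hjm (by exact_mod_cast this))]
        exact hd2 j (by omega) hj2

def pvLoopCellRow (land : List (List Int)) (height cc : Int)
    (dp : PySem.Dict (Int × Int) Int) (i : Int) : PySem.Dict (Int × Int) Int :=
  (PySem.List.pyRange (cc - 2) (-1) (-1)).foldl (pvLoopCell land height i) dp

theorem pv_loop3_inner (g : List (List Int)) (h : Int) (C : Nat) (hC : 1 ≤ C)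
    (hCdef : C = (g.headD []).length) (i : Nat) (hiR : i + 1 < g.length) :
    ∀ (n : Nat) (d : PySem.Dict (Int × Int) Int), n < C →
      (∀ i' j : Nat, i' < g.length → j < C → (i + 1 ≤ i' ∨ i' = g.length - 1 ∨ j = C - 1) →
        d.get? ((i' : Int), (j : Int)) = some (pvVal h g i' j)) →
      (∀ j : Nat, n ≤ j → j < C → d.get? ((i : Int), (j : Int)) = some (pvVal h g i j)) →
      (∀ i' j : Nat, i' < g.length → j < C → (i + 1 ≤ i' ∨ i' = g.length - 1 ∨ j = C - 1) →
        ((PySem.List.pyRange ((n : Int) - 1) (-1) (-1)).foldl (pvLoopCell g h (i : Int)) d).get?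
          ((i' : Int), (j : Int)) = some (pvVal h g i' j)) ∧
      (∀ j : Nat, j < C →
        ((PySem.List.pyRange ((n : Int) - 1) (-1) (-1)).foldl (pvLoopCell g h (i : Int)) d).get?
          ((i : Int), (j : Int)) = some (pvVal h g i j)) := by
  intro n
  induction n with
  | zero =>
    intro d _ hd1 hd2
    rw [show ((0 : Nat) : Int) - 1 = -1 from by norm_num, PySem.List.pyRange_neg_one_eq_nil (by norm_num)]
    exact ⟨fun i' j h1 h2 h3 => hd1 i' j h1 h2 h3, fun j hj => hd2 j (by omega) hj⟩
  | succ m ih =>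
    intro d hn hd1 hd2
    rw [show ((m + 1 : Nat) : Int) - 1 = (m : Int) from by push_cast; ring]
    rw [PySem.List.pyRange_neg_one_cons (by omega : (-1 : Int) < (m : Int))]
    rw [List.foldl_cons]
    have hbody : pvLoopCell g h (i : Int) d (m : Int)
        = d.insert ((i : Int), (m : Int)) (pvVal h g i m) := by
      unfold pvLoopCell
      simp only
      have hgetD : d.get? ((i : Int) + 1, (m : Int)) = some (pvVal h g (i+1) m) := by
        have := hd1 (i+1) m (by omega) (by omega) (by omega)
        rw [show ((i + 1 : Nat) : Int) = (i : Int) + 1 from by push_cast; ring] at this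
        exact this
      have hgetR : d.get? ((i : Int), (m : Int) + 1) = some (pvVal h g i (m+1)) := by
        have := hd2 (m+1) (by omega) (by omega)
        rw [show ((m + 1 : Nat) : Int) = (m : Int) + 1 from by push_cast; ring] at this
        exact this
      have hijD : pvGetIJ g ((i : Int) + 1) (m : Int) = pvA g (i+1) m := by
        rw [show ((i : Int) + 1) = ((i + 1 : Nat) : Int) from by push_cast; ring]
        exact pvGetIJ_eq g (i+1) m
      have hijR : pvGetIJ g (i : Int) ((m : Int) + 1) = pvA g i (m+1) := by
        rw [show ((m : Int) + 1) = ((m + 1 : Nat) : Int) from by push_cast; ring]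
        exact pvGetIJ_eq g i (m+1)
      have hij0 : pvGetIJ g (i : Int) (m : Int) = pvA g i m := pvGetIJ_eq g i m
      rw [hijD, hijR, hij0, hgetD, hgetR]
      simp only [Option.getD_some]
      rw [pv_if_edge h (pvVal h g (i+1) m) (pvA g i m) (pvA g (i+1) m)]
      rw [pv_if_edge h (pvVal h g i (m+1)) (pvA g i m) (pvA g i (m+1))]
      rw [show pvVal h g (i+1) m + pvEdge h (pvA g i m) (pvA g (i+1) m)
            = pvEdge h (pvA g i m) (pvA g (i+1) m) + pvVal h g (i+1) m from add_comm _ _]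
      rw [show pvVal h g i (m+1) + pvEdge h (pvA g i m) (pvA g i (m+1))
            = pvEdge h (pvA g i m) (pvA g i (m+1)) + pvVal h g i (m+1) from add_comm _ _]
      rw [← pvVal_mid h g i m hiR (by omega)]
    rw [hbody]
    have hres := ih (d.insert ((i : Int), (m : Int)) (pvVal h g i m)) (by omega) ?_ ?_
    · exact hres
    · intro i' j h1 h2 h3
      rw [PySem.Dict.get?_insert, if_neg (by
        intro hcon
        have h4 := congrArg Prod.fst hcon
        have h5 := congrArg Prod.snd hcon
        simp only at h4 h5
        have h4' : i' = i := by exact_mod_cast h4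
        have h5' : j = m := by exact_mod_cast h5
        omega)]
      exact hd1 i' j h1 h2 h3
    · intro j hj1 hj2
      rw [PySem.Dict.get?_insert]
      by_cases hjm : j = m
      · subst hjm
        rw [if_pos rfl]
      · rw [if_neg (by
          intro hcon
          have h5 := congrArg Prod.snd hcon
          simp only at h5
          exact hjm (by exact_mod_cast h5))]
        exact hd2 j (by omega) hj2

theorem pv_loop3_outer (g : List (List Int)) (h : Int) (C : Nat) (hC : 1 ≤ C)
    (hCdef : C = (g.headD []).length) :
    ∀ (n : Nat) (d : PySem.Dict (Int × Int) Int), n < g.length →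
      (∀ i j : Nat, i < g.length → j < C → (n ≤ i ∨ i = g.length - 1 ∨ j = C - 1) →
        d.get? ((i : Int), (j : Int)) = some (pvVal h g i j)) →
      (∀ i j : Nat, i < g.length → j < C →
        ((PySem.List.pyRange ((n : Int) - 1) (-1) (-1)).foldl (pvLoopCellRow g h (C : Int)) d).get?
          ((i : Int), (j : Int)) = some (pvVal h g i j)) := by
  intro n
  induction n with
  | zero =>
    intro d _ hd i j hi hj
    rw [show ((0 : Nat) : Int) - 1 = -1 from by norm_num, PySem.List.pyRange_neg_one_eq_nil (by norm_num)]
    exact hd i j hi hj (by omega)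
  | succ m ih =>
    intro d hn hd i j hi hj
    rw [show ((m + 1 : Nat) : Int) - 1 = (m : Int) from by push_cast; ring]
    rw [PySem.List.pyRange_neg_one_cons (by omega : (-1 : Int) < (m : Int))]
    rw [List.foldl_cons]
    have hinner := pv_loop3_inner g h C hC hCdef m (by omega) (C - 1) d (by omega)
      (fun i' j' h1 h2 h3 => hd i' j' h1 h2 (by omega))
      (fun j' hj1 hj2 => hd m j' (by omega) hj2 (by omega))
    have hrow : pvLoopCellRow g h (C : Int) d (m : Int)
        = (PySem.List.pyRange (((C - 1 : Nat) : Int) - 1) (-1) (-1)).foldl (pvLoopCell g h (m : Int)) d := by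
      unfold pvLoopCellRow
      rw [show (C : Int) - 2 = ((C - 1 : Nat) : Int) - 1 from by omega]
    rw [hrow]
    refine ih _ (by omega) ?_ i j hi hj
    intro i' j' h1 h2 h3
    rcases h3 with h3 | h3 | h3
    · by_cases him : i' = m
      · subst him
        exact hinner.2 j' h2
      · exact hinner.1 i' j' h1 h2 (by omega)
    · exact hinner.1 i' j' h1 h2 (by omega)
    · exact hinner.1 i' j' h1 h2 (by omega)

theorem cost_to_end_eq (g : List (List Int)) (h : Int) (hne : g ≠ [])
    (hC : 1 ≤ (g.headD []).length)
    (hall : ∀ row ∈ g, (g.headD []).length ≤ row.length) :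
    cost_to_end g h = pvVal h g 0 0 := by
  cases hg0 : g with
  | nil => exact absurd hg0 hne
  | cons r0 rest =>
    subst hg0
    simp only [List.headD_cons] at hC hall ⊢
    unfold cost_to_end
    simp only [PySem.List.pyGet?_zero_cons, Option.getD_some]
    rw [show (fun (dp : PySem.Dict (Int × Int) Int) (i : Int) =>
        if |pvGetIJ (r0 :: rest) (i + 1) ((r0.length : Int) - 1) - pvGetIJ (r0 :: rest) i ((r0.length : Int) - 1)| > h then
          dp.insert (i, (r0.length : Int) - 1)
            ((dp.get? (i + 1, (r0.length : Int) - 1)).getD 0 +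
              |pvGetIJ (r0 :: rest) (i + 1) ((r0.length : Int) - 1) - pvGetIJ (r0 :: rest) i ((r0.length : Int) - 1)|)
        else dp.insert (i, (r0.length : Int) - 1) ((dp.get? (i + 1, (r0.length : Int) - 1)).getD 0))
        = pvLoopCol (r0 :: rest) h (r0.length : Int) from by
      funext dp i
      simp only [pvLoopCol]]
    rw [show (fun (dp : PySem.Dict (Int × Int) Int) (i : Int) =>
        if |pvGetIJ (r0 :: rest) (((r0 :: rest).length : Int) - 1) (i + 1) -
              pvGetIJ (r0 :: rest) (((r0 :: rest).length : Int) - 1) i| > h then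
          dp.insert (((r0 :: rest).length : Int) - 1, i)
            ((dp.get? (((r0 :: rest).length : Int) - 1, i + 1)).getD 0 +
              |pvGetIJ (r0 :: rest) (((r0 :: rest).length : Int) - 1) (i + 1) -
                pvGetIJ (r0 :: rest) (((r0 :: rest).length : Int) - 1) i|)
        else dp.insert (((r0 :: rest).length : Int) - 1, i)
            ((dp.get? (((r0 :: rest).length : Int) - 1, i + 1)).getD 0))
        = pvLoopRow (r0 :: rest) h ((r0 :: rest).length : Int) from by
      funext dp i
      simp only [pvLoopRow]]
    rw [show (fun (dp : PySem.Dict (Int × Int) Int) (i : Int) =>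
        List.foldl
          (fun (dp : PySem.Dict (Int × Int) Int) (j : Int) =>
            dp.insert (i, j)
              (min
                (if |pvGetIJ (r0 :: rest) (i + 1) j - pvGetIJ (r0 :: rest) i j| > h then
                  (dp.get? (i + 1, j)).getD 0 + |pvGetIJ (r0 :: rest) (i + 1) j - pvGetIJ (r0 :: rest) i j|
                else (dp.get? (i + 1, j)).getD 0)
                (if |pvGetIJ (r0 :: rest) i (j + 1) - pvGetIJ (r0 :: rest) i j| > h then
                  (dp.get? (i, j + 1)).getD 0 + |pvGetIJ (r0 :: rest) i (j + 1) - pvGetIJ (r0 :: rest) i j|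
                else (dp.get? (i, j + 1)).getD 0)))
          dp (PySem.List.pyRange ((r0.length : Int) - 2) (-1) (-1)))
        = pvLoopCellRow (r0 :: rest) h (r0.length : Int) from by
      funext dp i
      simp only [pvLoopCellRow]
      rfl]
    -- normalise the Int index expressions to casts of Nats
    rw [show ((r0 :: rest).length : Int) - 2 = (((r0 :: rest).length - 1 : Nat) : Int) - 1 from by
      simp only [List.length_cons]; omega]
    rw [show ((r0.length : Int)) - 2 = (((r0.length - 1 : Nat)) : Int) - 1 from by omega]
    rw [show ((r0 :: rest).length : Int) - 1 = (((r0 :: rest).length - 1 : Nat) : Int) from by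
      simp only [List.length_cons]; omega]
    rw [show ((r0.length : Int)) - 1 = (((r0.length - 1 : Nat)) : Int) from by omega]
    have hCdef : r0.length = ((r0 :: rest).headD []).length := by simp
    have h1 := pv_loop1 (r0 :: rest) h r0.length hC hCdef
      ((r0 :: rest).length - 1)
      (PySem.Dict.empty.insert ((((r0 :: rest).length - 1 : Nat) : Int), (((r0.length - 1 : Nat)) : Int)) 0)
      (by simp)
      (by
        intro i hi1 hi2
        have : i = (r0 :: rest).length - 1 := by
          simp only [List.length_cons] at hi1 hi2 ⊢
          omega
        subst this
        rw [PySem.Dict.get?_insert_self]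
        unfold pvVal
        rw [show (r0 :: rest).length - 1 - ((r0 :: rest).length - 1) = 0 from by omega,
            show ((r0 :: rest).headD []).length - 1 - (r0.length - 1) = 0 from by
              simp only [List.headD_cons]; omega]
        simp [pvG])
    have h2 := pv_loop2 (r0 :: rest) h r0.length hC hCdef (by simp)
      (r0.length - 1) _ (by omega) h1
      (by
        intro j hj1 hj2
        have : j = r0.length - 1 := by omega
        subst this
        exact h1 ((r0 :: rest).length - 1) (by simp))
    have h3 := pv_loop3_outer (r0 :: rest) h r0.length hC hCdef
      ((r0 :: rest).length - 1) _ (by simp)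
      (by
        intro i j hi hj hcase
        rcases hcase with hcase | hcase | hcase
        · have : i = (r0 :: rest).length - 1 := by
            simp only [List.length_cons] at hi hcase ⊢
            omega
          subst this
          exact h2.2 j hj
        · subst hcase
          exact h2.2 j hj
        · subst hcase
          exact h2.1 i hi)
    have hfinal := h3 0 0 (by simp) (by omega)
    rw [show ((0 : Int), (0 : Int)) = (((0 : Nat) : Int), ((0 : Nat) : Int)) from by norm_num] at *
    rw [hfinal]
    rfl

-- ===== VERDICT (by name: the statement is the Claim_ definition above) =====
theorem cost_to_end_spec : Claim_equal_cost_to_end := by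
  intro land height _ hpre
  obtain ⟨hne, hC, hall⟩ := hpre
  unfold Spec_cost_to_end
  rw [cost_to_end_eq land height hne hC hall, cost_to_end_alt_eq land height hne hC hall]
  rfl
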